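-- pv_equiv track=rewrite | github.com/stefanoandroni/foobar | level4/free_the_bunny_workers/solution.py | solution
-- ===== SOURCE A (Python) =====
-- from itertools import combinations as comb # emitted in lexicographic ordering according to the order of the input iterable
--
-- def solution(num_buns, num_required):
--     n = num_buns - (num_required - 1)  # n: copies for each key
--     c = comb(range(num_buns), n)  # c: all possible [r] length subsequences of elements from the input [i]
--
--     # Initialize the 'out' list with empty lists for each bunny
--     out = [[] for _ in range(num_buns)]
--     # Iterate through the combinations [c] and assign keys [k] to bunnies [b]
--     for k, bunnies in enumerate(c):
--         for b in bunnies: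
--             out[b].append(k)
--
--     return out
-- ===== SOURCE B (Python) =====
-- def solution(num_buns, num_required):
--     n = num_buns - (num_required - 1)  # copies of each key
--
--     def binom(m, r):
--         if r < 0 or r > m:
--             return 0
--         res = 1
--         for i in range(r):
--             res = res * (m - i) // (i + 1)
--         return res
--
--     # Level-by-level construction, no combination is ever materialised: a frontier
--     # node (r, start) stands for 'the r-subsets of the remaining bunnies, whose key
--     # indices begin at start, in lex order'.  The current bunny is in exactly the
--     # first binom(m-1, r-1) of them (a contiguous index block), and the node splits
--     # into the subsets with the current bunny (r-1 among the rest) and without it.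
--     out = []
--     frontier = [(n, 0)]
--     for b in range(num_buns):
--         m = num_buns - b  # bunnies not yet processed (current one included)
--         row = []
--         nxt = []
--         for r, start in frontier:
--             if r <= 0 or r > m:
--                 continue  # no subsets here: contributes no keys, no children
--             left = binom(m - 1, r - 1)
--             for k in range(start, start + left):
--                 row.append(k)
--             nxt.append((r - 1, start))
--             nxt.append((r, start + left))
--         out.append(row)
--         frontier = nxt
--     return out
-- ===== Notes on version B (the rewrite author's own statement) =====
-- stated objective: alternative
-- what changed: B never enumerates the combinations at all: it builds the assignment recursively from the lex structure of n-subsets (bunny 0 gets the first C(m-1,n-1) key indices as a contiguous range, the remaining bunnies are the elementwise merge of the two recursive sub-assignments), with a hand-rolled binomial to size the blocks, instead of A's enumerate-and-distribute pass over itertools.combinations.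
import Mathlib
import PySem

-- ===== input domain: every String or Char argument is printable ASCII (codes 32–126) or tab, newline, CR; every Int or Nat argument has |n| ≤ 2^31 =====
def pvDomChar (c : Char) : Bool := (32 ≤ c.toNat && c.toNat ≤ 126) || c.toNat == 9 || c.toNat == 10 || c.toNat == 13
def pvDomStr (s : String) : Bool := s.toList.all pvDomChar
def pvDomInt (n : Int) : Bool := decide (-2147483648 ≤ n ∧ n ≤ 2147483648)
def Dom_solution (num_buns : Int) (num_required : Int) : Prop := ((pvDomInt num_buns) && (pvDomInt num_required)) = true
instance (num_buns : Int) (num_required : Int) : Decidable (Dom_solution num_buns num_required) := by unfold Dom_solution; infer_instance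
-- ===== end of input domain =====

-- B never materialises a combination: it builds the assignment level by level with a
-- frontier of (r, start) nodes (lex blocks of r-subsets of the remaining bunnies),
-- giving the current bunny a contiguous binom-sized range of key indices per node,
-- instead of A's enumerate-and-distribute pass over itertools.combinations.
-- Objective: alternative.


-- ===== PORT A =====
-- itertools.combinations(range(num_buns), n), as PySem.List.combinations but with the
-- 'not enough elements left' branch pruned so the port evaluates in polynomial time per
-- emitted combination (PySem's definition explores the empty branches exponentially);
-- proved pointwise equal to PySem.List.combinations in combFast_eq below.
def combFast {α : Type} : List α → Nat → List (List α)
  | _, 0 => [[]]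
  | [], _ + 1 => []
  | x :: ys, s + 1 =>
      if ys.length < s then []
      else (combFast ys s).map (x :: ·) ++ combFast ys (s + 1)

-- out[b].append(k): every b comes from a combination of range(num_buns), so 0 ≤ b < num_buns
-- and List.modify at index b.toNat is exactly Python's in-place append at out[b].
def solution (num_buns : Int) (num_required : Int) : List (List Int) :=
  let n : Int := num_buns - (num_required - 1)
  let c : List (List Int) := combFast (PySem.List.pyRange 0 num_buns 1) n.toNat
  let out : List (List Int) := (PySem.List.pyRange 0 num_buns 1).map (fun _ => [])
  (PySem.List.enumerate c 0).foldl
    (fun out p => p.2.foldl (fun o b => o.modify b.toNat (fun l => l ++ [p.1])) out) out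

-- ===== PORT B =====
-- binom(m, r): the hand-written falling-factorial product loop of Source B, floor division included
def binomB (m : Int) (r : Int) : Int :=
  if r < 0 ∨ m < r then 0
  else (PySem.List.pyRange 0 r 1).foldl
    (fun res i => PySem.Int.floordiv (res * (m - i)) (i + 1)) 1

-- the inner 'for r, start in frontier' loop of Source B: builds (row, nxt) for one level
def stepB (m : Int) (fr : List (Int × Int)) : List Int × List (Int × Int) :=
  fr.foldl
    (fun (acc : List Int × List (Int × Int)) p =>
      if p.1 ≤ 0 ∨ m < p.1 then acc
      else
        let left := binomB (m - 1) (p.1 - 1)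
        ((PySem.List.pyRange p.2 (p.2 + left) 1).foldl (fun row k => row ++ [k]) acc.1,
         acc.2 ++ [(p.1 - 1, p.2), (p.1, p.2 + left)]))
    ([], [])

def solution_alt (num_buns : Int) (num_required : Int) : List (List Int) :=
  let n : Int := num_buns - (num_required - 1)
  ((PySem.List.pyRange 0 num_buns 1).foldl
    (fun (st : List (List Int) × List (Int × Int)) b =>
      let res := stepB (num_buns - b) st.2
      (st.1 ++ [res.1], res.2))
    ([], [(n, 0)])).1

-- ===== PRECONDITION & SPEC =====
-- Pre_ excludes exactly the inputs where itertools.combinations raises ValueError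
-- ('r must be non-negative'), i.e. num_buns - (num_required - 1) < 0.
def Pre_solution (num_buns : Int) (num_required : Int) : Prop :=
  0 ≤ num_buns - (num_required - 1)
instance (num_buns : Int) (num_required : Int) : Decidable (Pre_solution num_buns num_required) := by unfold Pre_solution; infer_instance

def pvWitness_solution : Int × Int := (4, 2)

def Spec_solution (num_buns : Int) (num_required : Int) (out : List (List Int)) : Prop := out = solution_alt num_buns num_required
instance (num_buns : Int) (num_required : Int) (out : List (List Int)) : Decidable (Spec_solution num_buns num_required out) := by unfold Spec_solution; infer_instance

-- ===== CLAIM (what is proved, stated in full; the proofs are below) =====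
def Claim_equal_solution : Prop := ∀ (num_buns : Int) (num_required : Int), Dom_solution num_buns num_required → Pre_solution num_buns num_required → Spec_solution num_buns num_required (solution num_buns num_required)

-- ===== LEMMAS AND PROOFS =====

-- the pruned enumeration is PySem's (CPython's) combinations, value for value
theorem combFast_eq {α : Type} (xs : List α) (r : Nat) :
    combFast xs r = PySem.List.combinations xs r := by
  induction xs generalizing r with
  | nil => cases r <;> simp [combFast, PySem.List.combinations_zero, PySem.List.combinations_nil_succ]
  | cons x ys ih =>
    cases r with
    | zero => simp [combFast, PySem.List.combinations_zero]
    | succ s =>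
      rw [PySem.List.combinations_cons_succ, combFast, ← ih, ← ih]
      by_cases h : ys.length < s
      · have h1 : (combFast ys s) = [] := by
          rw [ih]; exact PySem.List.combinations_eq_nil_of_length_lt ys h
        have h2 : (combFast ys (s + 1)) = [] := by
          rw [ih]; exact PySem.List.combinations_eq_nil_of_length_lt ys (by omega)
        simp [h, h1, h2]
      · simp [h]

-- ---- characterisation shared by both ports ----
-- rowOf xs r start b: the key indices (counted from start) of the r-subsets of xs containing b
def rowOf (xs : List Int) (r : Int) (start b : Int) : List Int :=
  ((PySem.List.enumerate (PySem.List.combinations xs r.toNat) start).filter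
    (fun p => decide (b ∈ p.2))).map Prod.fst

def pull (xs : List Int) (r : Int) (start : Int) : List (List Int) :=
  xs.map (fun b => rowOf xs r start b)

-- ---- A-side: the distributing fold computes pull ----

theorem fold_one_combo (c : List Int) (k : Int) (out : List (List Int)) (i : Nat)
    (hpos : ∀ b ∈ c, 0 ≤ b) (hnd : c.Nodup) :
    (c.foldl (fun o b => o.modify b.toNat (fun l => l ++ [k])) out)[i]? =
      out[i]?.map (fun l => if (i : Int) ∈ c then l ++ [k] else l) := by
  induction c generalizing out with
  | nil => cases h : out[i]? <;> simp [h]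
  | cons b rest ih =>
    have hb : 0 ≤ b := hpos b (by simp)
    simp only [List.foldl_cons]
    rw [ih _ (fun x hx => hpos x (by simp [hx])) hnd.of_cons]
    rw [List.getElem?_modify]
    by_cases hib : (i : Int) = b
    · have hbt : b.toNat = i := by omega
      have hnr : (i : Int) ∉ rest := by
        rw [hib]; exact (List.nodup_cons.mp hnd).1
      have hbn : b ∉ rest := hib ▸ hnr
      cases out[i]? <;> simp [hbt, hib, hbn]
    · have hbt : b.toNat ≠ i := by omega
      cases out[i]? <;> simp [hbt, List.mem_cons, hib]

theorem fold_all_pairs (pairs : List (Int × List Int)) (out : List (List Int)) (i : Nat)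
    (hpos : ∀ p ∈ pairs, ∀ b ∈ p.2, 0 ≤ b) (hnd : ∀ p ∈ pairs, p.2.Nodup) :
    (pairs.foldl (fun out p => p.2.foldl (fun o b => o.modify b.toNat (fun l => l ++ [p.1])) out) out)[i]? =
      out[i]?.map (fun l => l ++ ((pairs.filter (fun p => decide ((i : Int) ∈ p.2))).map Prod.fst)) := by
  induction pairs generalizing out with
  | nil => cases h : out[i]? <;> simp [h]
  | cons p rest ih =>
    simp only [List.foldl_cons]
    rw [ih _ (fun q hq => hpos q (by simp [hq])) (fun q hq => hnd q (by simp [hq]))]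
    rw [fold_one_combo p.2 p.1 out i (hpos p (by simp)) (hnd p (by simp))]
    by_cases hm : (i : Int) ∈ p.2
    · cases h : out[i]? <;> simp [hm]
    · cases h : out[i]? <;> simp [hm]

theorem combo_props (num_buns : Int) (r : Nat) (c : List Int)
    (hc : c ∈ PySem.List.combinations (PySem.List.pyRange 0 num_buns 1) r) :
    (∀ b ∈ c, 0 ≤ b) ∧ c.Nodup := by
  have hsub := PySem.List.sublist_of_mem_combinations hc
  constructor
  · intro b hb
    have := hsub.mem hb
    exact (PySem.List.mem_pyRange_one.mp this).1
  · exact hsub.nodup (PySem.List.nodup_pyRange_one 0 num_buns)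

theorem solution_eq_pull (num_buns : Int) (num_required : Int) :
    solution num_buns num_required =
      pull (PySem.List.pyRange 0 num_buns 1) (num_buns - (num_required - 1)) 0 := by
  unfold solution pull rowOf
  set r := (num_buns - (num_required - 1)).toNat with hr
  simp only [combFast_eq]
  set combos := PySem.List.combinations (PySem.List.pyRange 0 num_buns 1) r with hcombos
  have hprops : ∀ p ∈ PySem.List.enumerate combos 0, (∀ b ∈ p.2, 0 ≤ b) ∧ p.2.Nodup := by
    intro p hp
    obtain ⟨k, hk, rfl⟩ := (PySem.List.mem_enumerate_iff (xs := combos) (s := 0) (p := p)).mp hp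
    exact combo_props num_buns r _ (List.getElem_mem hk)
  apply List.ext_getElem?
  intro i
  rw [fold_all_pairs _ _ i (fun p hp => (hprops p hp).1) (fun p hp => (hprops p hp).2)]
  rcases Nat.lt_or_ge i (PySem.List.pyRange 0 num_buns 1).length with hi | hi
  · rw [List.getElem?_map, List.getElem?_map, List.getElem?_eq_getElem hi]
    have hib : (PySem.List.pyRange 0 num_buns 1)[i] = (i : Int) := by
      rw [PySem.List.getElem_pyRange_one]; omega
    simp [hib, hcombos, hr]
  · rw [List.getElem?_map, List.getElem?_map, List.getElem?_eq_none hi]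
    rfl

-- ---- B-side: the frontier loop computes pull ----

theorem comb_length {α : Type} (xs : List α) (r : Nat) :
    (PySem.List.combinations xs r).length = xs.length.choose r := by
  induction xs generalizing r with
  | nil => cases r <;> simp [PySem.List.combinations_zero, PySem.List.combinations_nil_succ]
  | cons x ys ih =>
    cases r with
    | zero => simp [PySem.List.combinations_zero]
    | succ s =>
      rw [PySem.List.combinations_cons_succ]
      simp [ih, Nat.choose_succ_succ]

theorem binom_loop (m : Int) (k : Nat) (hk : (k : Int) ≤ m) :
    (PySem.List.pyRange 0 (k : Int) 1).foldl
      (fun res i => PySem.Int.floordiv (res * (m - i)) (i + 1)) 1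
      = (m.toNat.choose k : Int) := by
  induction k with
  | zero => simp [PySem.List.pyRange_one_eq_nil]
  | succ j ih =>
    have hj : (j : Int) ≤ m := by push_cast at hk ⊢; omega
    have hsplit : PySem.List.pyRange 0 ((j : Nat) + 1 : Int) 1 =
        PySem.List.pyRange 0 (j : Int) 1 ++ [(j : Int)] := by
      have := PySem.List.pyRange_one_succ_right (a := 0) (b := (j : Int)) (by positivity)
      simpa using this
    have hcast : ((j + 1 : Nat) : Int) = ((j : Nat) + 1 : Int) := by push_cast; ring
    rw [hcast, hsplit, List.foldl_append, ih hj]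
    simp only [List.foldl_cons, List.foldl_nil]
    have hjm : j < m.toNat := by omega
    have hmj : m - (j : Int) = ((m.toNat - j : Nat) : Int) := by omega
    rw [hmj]
    have hidN : m.toNat.choose j * (m.toNat - j) = m.toNat.choose (j + 1) * (j + 1) :=
      (Nat.choose_succ_right_eq m.toNat j).symm
    have hid : (m.toNat.choose j : Int) * ((m.toNat - j : Nat) : Int)
        = (m.toNat.choose (j + 1) : Int) * ((j : Int) + 1) := by
      exact_mod_cast congrArg (Nat.cast : Nat → Int) hidN
    rw [hid, PySem.Int.floordiv_eq_ediv_of_pos (by positivity)]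
    exact Int.mul_ediv_cancel _ (by positivity : (0:Int) < (j:Int) + 1).ne'

theorem binomB_eq (m r : Int) (h0 : 0 ≤ r) (hm : r ≤ m) :
    binomB m r = (m.toNat.choose r.toNat : Int) := by
  unfold binomB
  rw [if_neg (by omega)]
  have : ((r.toNat : Nat) : Int) = r := by omega
  rw [← this]
  exact binom_loop m r.toNat (by omega)

-- the block size binom(m-1, r-1) of Source B counts the combinations of the tail
theorem binomB_comb (ys : List Int) (r : Int) (hr0 : 0 < r) (hrm : r ≤ (ys.length : Int) + 1) :
    binomB (ys.length : Int) (r - 1)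
      = ((PySem.List.combinations ys (r - 1).toNat).length : Int) := by
  rw [binomB_eq _ _ (by omega) (by omega), comb_length]
  simp

-- enumerate over a mapped list carries the indices unchanged
theorem enumerate_map {α β : Type} (f : α → β) (l : List α) (s : Int) :
    PySem.List.enumerate (l.map f) s = (PySem.List.enumerate l s).map (fun p => (p.1, f p.2)) := by
  induction l generalizing s with
  | nil => simp [PySem.List.enumerate_nil]
  | cons x t ih => simp [PySem.List.enumerate_cons, ih]

-- a dead node (r ≤ 0 or r > m) owns no subsets: its row is empty for every bunny
theorem rowOf_dead (xs : List Int) (r start b : Int)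
    (h : r ≤ 0 ∨ (xs.length : Int) < r) : rowOf xs r start b = [] := by
  unfold rowOf
  rcases h with h | h
  · have : r.toNat = 0 := by omega
    rw [this, PySem.List.combinations_zero]
    simp [PySem.List.enumerate_cons, PySem.List.enumerate_nil]
  · rw [PySem.List.combinations_eq_nil_of_length_lt _ (by omega)]
    simp [PySem.List.enumerate_nil]

-- the head bunny is in exactly the first block of subsets: a contiguous index range
theorem rowOf_head (x : Int) (ys : List Int) (r start : Int) (hx : x ∉ ys)
    (hr0 : 0 < r) (_hrm : r ≤ ((x :: ys).length : Int)) :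
    rowOf (x :: ys) r start x
      = PySem.List.pyRange start
          (start + ((PySem.List.combinations ys (r - 1).toNat).length : Int)) 1 := by
  unfold rowOf
  have hrt : r.toNat = (r - 1).toNat + 1 := by omega
  rw [hrt, PySem.List.combinations_cons_succ, PySem.List.enumerate_append, enumerate_map]
  set C1 := PySem.List.combinations ys (r - 1).toNat with hC1
  rw [List.filter_append, List.filter_map]
  have hf1 : ((PySem.List.enumerate C1 start).filter
      ((fun p => decide (x ∈ p.2)) ∘ (fun p : Int × List Int => (p.1, x :: p.2))))
      = PySem.List.enumerate C1 start := by
    apply List.filter_eq_self.mpr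
    intro p _
    simp
  have hf2 : (PySem.List.enumerate (PySem.List.combinations ys ((r - 1).toNat + 1))
      (start + ((C1.map (x :: ·)).length : Int))).filter (fun p => decide (x ∈ p.2)) = [] := by
    apply List.filter_eq_nil_iff.mpr
    intro p hp
    obtain ⟨k, hk, rfl⟩ := (PySem.List.mem_enumerate_iff
      (xs := PySem.List.combinations ys ((r - 1).toNat + 1))
      (s := start + ((C1.map (x :: ·)).length : Int)) (p := p)).mp hp
    have hsub := PySem.List.sublist_of_mem_combinations (List.getElem_mem hk)
    simp only [decide_eq_true_eq]
    intro hxin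
    exact hx (hsub.mem hxin)
  rw [hf1, hf2, List.append_nil, List.map_map]
  have : (Prod.fst ∘ fun p : Int × List Int => (p.1, x :: p.2)) = Prod.fst := rfl
  rw [this, PySem.List.map_fst_enumerate]

-- a non-head bunny's row splits into with-head and without-head blocks
theorem rowOf_tail (x : Int) (ys : List Int) (r start b : Int) (hx : x ∉ ys) (hb : b ∈ ys)
    (hr0 : 0 < r) (_hrm : r ≤ ((x :: ys).length : Int)) :
    rowOf (x :: ys) r start b
      = rowOf ys (r - 1) start b ++
        rowOf ys r (start + ((PySem.List.combinations ys (r - 1).toNat).length : Int)) b := by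
  unfold rowOf
  have hrt : r.toNat = (r - 1).toNat + 1 := by omega
  rw [hrt, PySem.List.combinations_cons_succ, PySem.List.enumerate_append, enumerate_map]
  have hbx : b ≠ x := fun h => hx (h ▸ hb)
  rw [List.filter_append, List.map_append, List.filter_map, List.map_map]
  congr 2
  · apply List.filter_congr
    intro p _
    simp [hbx]
  · simp

-- the fold of stepB, with its accumulator generalised
theorem stepB_acc (m : Int) (fr : List (Int × Int)) (acc : List Int × List (Int × Int)) :
    fr.foldl
      (fun (acc : List Int × List (Int × Int)) p =>
        if p.1 ≤ 0 ∨ m < p.1 then acc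
        else
          let left := binomB (m - 1) (p.1 - 1)
          ((PySem.List.pyRange p.2 (p.2 + left) 1).foldl (fun row k => row ++ [k]) acc.1,
           acc.2 ++ [(p.1 - 1, p.2), (p.1, p.2 + left)])) acc
    = (acc.1 ++ (fr.map (fun p => if p.1 ≤ 0 ∨ m < p.1 then []
          else PySem.List.pyRange p.2 (p.2 + binomB (m - 1) (p.1 - 1)) 1)).flatten,
       acc.2 ++ fr.flatMap (fun p => if p.1 ≤ 0 ∨ m < p.1 then []
          else [(p.1 - 1, p.2), (p.1, p.2 + binomB (m - 1) (p.1 - 1))])) := by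
  induction fr generalizing acc with
  | nil => simp
  | cons p t ih =>
    simp only [List.foldl_cons, List.map_cons, List.flatten_cons, List.flatMap_cons]
    by_cases h : p.1 ≤ 0 ∨ m < p.1
    · rw [if_pos h, ih, if_pos h, if_pos h]
      simp
    · rw [if_neg h, ih, if_neg h, if_neg h]
      simp only [PySem.List.foldl_append_singleton_eq_self]
      simp

-- one level: the row handed to the head bunny
theorem step_head (x : Int) (ys : List Int) (hx : x ∉ ys) (fr : List (Int × Int)) :
    (stepB (((x :: ys).length : Nat) : Int) fr).1
      = (fr.map (fun p => rowOf (x :: ys) p.1 p.2 x)).flatten := by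
  unfold stepB
  rw [stepB_acc]
  simp only [List.nil_append]
  congr 1
  apply List.map_congr_left
  intro p _
  by_cases h : p.1 ≤ 0 ∨ (((x :: ys).length : Nat) : Int) < p.1
  · rw [if_pos h, rowOf_dead _ _ _ _ (by simpa using h)]
  · rw [if_neg h]
    have h' : 0 < p.1 ∧ p.1 ≤ ((x :: ys).length : Int) := by
      simp at h ⊢; omega
    rw [rowOf_head x ys p.1 p.2 hx h'.1 h'.2,
      show (((x :: ys).length : Nat) : Int) - 1 = (ys.length : Int) by simp,
      binomB_comb ys p.1 h'.1 (by simpa using h'.2)]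

-- one level: the rows of the remaining bunnies pass to the children frontier
theorem step_tail (x : Int) (ys : List Int) (hx : x ∉ ys) (fr : List (Int × Int))
    (b : Int) (hb : b ∈ ys) :
    (((stepB (((x :: ys).length : Nat) : Int) fr).2).map
        (fun p => rowOf ys p.1 p.2 b)).flatten
      = (fr.map (fun p => rowOf (x :: ys) p.1 p.2 b)).flatten := by
  unfold stepB
  rw [stepB_acc]
  simp only [List.nil_append]
  induction fr with
  | nil => simp
  | cons p t ih =>
    simp only [List.flatMap_cons, List.map_append, List.flatten_append, List.map_cons,
      List.flatten_cons, ih]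
    congr 1
    by_cases h : p.1 ≤ 0 ∨ (((x :: ys).length : Nat) : Int) < p.1
    · rw [if_pos h, rowOf_dead _ _ _ _ (by simpa using h)]
      simp
    · rw [if_neg h]
      have h' : 0 < p.1 ∧ p.1 ≤ ((x :: ys).length : Int) := by
        simp at h ⊢; omega
      rw [rowOf_tail x ys p.1 p.2 b hx hb h'.1 h'.2,
        show (((x :: ys).length : Nat) : Int) - 1 = (ys.length : Int) by simp,
        binomB_comb ys p.1 h'.1 (by simpa using h'.2)]
      simp

-- the whole outer loop: rows so far ++ the table the current frontier still owes
theorem loop_inv (M : Int) (k : Nat) :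
    ∀ (a : Int), M - a = (k : Int) →
    ∀ (fr : List (Int × Int)) (acc : List (List Int)),
    ((PySem.List.pyRange a M 1).foldl
        (fun (st : List (List Int) × List (Int × Int)) b =>
          let res := stepB (M - b) st.2
          (st.1 ++ [res.1], res.2)) (acc, fr)).1
      = acc ++ (PySem.List.pyRange a M 1).map
          (fun b => (fr.map (fun p => rowOf (PySem.List.pyRange a M 1) p.1 p.2 b)).flatten) := by
  induction k with
  | zero =>
    intro a ha fr acc
    rw [PySem.List.pyRange_one_eq_nil (by omega)]
    simp
  | succ j ih =>
    intro a ha fr acc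
    rw [PySem.List.pyRange_one_cons (by omega)]
    set ys := PySem.List.pyRange (a + 1) M 1 with hys
    have hax : a ∉ ys := by
      rw [hys]
      intro hmem
      have := (PySem.List.mem_pyRange_one.mp hmem).1
      omega
    have hlen : (((a :: ys).length : Nat) : Int) = M - a := by
      rw [hys]; simp [PySem.List.length_pyRange_one]; omega
    simp only [List.foldl_cons]
    rw [ih (a + 1) (by omega)]
    rw [List.map_cons]
    have hhead : (stepB (M - a) fr).1
        = (fr.map (fun p => rowOf (a :: ys) p.1 p.2 a)).flatten := by
      rw [← hlen, step_head a ys hax fr]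
    have htail : ys.map
          (fun b => (((stepB (M - a) fr).2).map (fun p => rowOf ys p.1 p.2 b)).flatten)
        = ys.map (fun b => (fr.map (fun p => rowOf (a :: ys) p.1 p.2 b)).flatten) := by
      apply List.map_congr_left
      intro b hb
      rw [← hlen, step_tail a ys hax fr b hb]
    rw [hhead, htail]
    simp

-- ===== VERDICT (by name: the statement is the Claim_ definition above) =====
theorem solution_spec : Claim_equal_solution := by
  intro num_buns num_required _ _
  unfold Spec_solution solution_alt
  rw [solution_eq_pull]
  rcases lt_or_ge num_buns 0 with hneg | hpos
  · rw [PySem.List.pyRange_one_eq_nil (by omega)]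
    rfl
  · rw [loop_inv num_buns num_buns.toNat 0 (by omega)]
    unfold pull
    apply List.map_congr_left
    intro b _
    simp
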